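-- pv_equiv track=rewrite | github.com/julianschelb/locisimiles | src/locisimiles/pipeline/rule_based.py | _has_valid_grammar
-- ===== SOURCE A (Python) =====
-- import itertools
-- from itertools import combinations
-- from typing import Dict, List, Tuple, Set, Union, Any, Optional, Sequence
--
-- def _has_valid_grammar(
--
--     pos_src: List[List[str]],
--     pos_tgt: List[List[str]],
--     valid: Set[Tuple[str, str]]
-- ) -> bool:
--     """Check if any valid grammar combination exists."""
--     combos_src = list(itertools.product(*pos_src)) if pos_src else []
--     combos_tgt = list(itertools.product(*pos_tgt)) if pos_tgt else []
--
--     shared_combos = set(combos_src).intersection(set(combos_tgt))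
--
--     for combo in shared_combos:
--         pairs = set(combinations(combo, 2))
--         if valid.intersection(pairs):
--             return True
--
--     return False
-- ===== SOURCE B (Python) =====
-- def _has_valid_grammar(pos_src, pos_tgt, valid):
--     """Check if any valid grammar combination exists (no product enumeration)."""
--     if len(pos_src) != len(pos_tgt):
--         return False
--     inter = [set(s) & set(t) for s, t in zip(pos_src, pos_tgt)]
--     if not all(inter):
--         return False
--     for a, b in valid:
--         seen_a = False
--         for s in inter:
--             if seen_a and b in s:
--                 return True
--             if a in s:
--                 seen_a = True
--     return False
-- ===== Notes on version B (the rewrite author's own statement) =====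
-- stated objective: faster
-- what changed: B replaces the exponential enumeration of the cartesian products and their intersection by per-position set intersections (all must be nonempty) plus one left-to-right scan of those intersections per valid pair, never materialising any combination.
import Mathlib
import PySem

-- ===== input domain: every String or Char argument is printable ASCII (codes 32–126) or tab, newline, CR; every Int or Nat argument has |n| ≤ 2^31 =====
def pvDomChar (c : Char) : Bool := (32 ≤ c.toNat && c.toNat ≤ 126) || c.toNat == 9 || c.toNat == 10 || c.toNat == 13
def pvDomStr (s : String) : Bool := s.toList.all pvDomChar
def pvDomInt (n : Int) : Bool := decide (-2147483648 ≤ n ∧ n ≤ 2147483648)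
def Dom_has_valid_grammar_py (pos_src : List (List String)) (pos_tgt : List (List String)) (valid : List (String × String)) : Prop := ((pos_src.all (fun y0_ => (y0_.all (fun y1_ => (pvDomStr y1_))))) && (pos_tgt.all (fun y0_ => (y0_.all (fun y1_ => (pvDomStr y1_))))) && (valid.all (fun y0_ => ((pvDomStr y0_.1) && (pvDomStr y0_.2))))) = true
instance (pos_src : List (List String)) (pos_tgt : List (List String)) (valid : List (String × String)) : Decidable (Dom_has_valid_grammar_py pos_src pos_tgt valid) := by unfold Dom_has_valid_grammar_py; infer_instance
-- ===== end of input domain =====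

-- B avoids A's exponential cartesian-product enumeration: per-position set intersections,
-- all required nonempty, then one scan of those intersections per valid pair (objective: faster).

-- ===== PORT A =====
-- itertools.product(*lists), leftmost factor varying slowest
def pvProduct : List (List String) → List (List String)
  | [] => [[]]
  | l :: ls => l.flatMap (fun x => (pvProduct ls).map (fun c => x :: c))

-- itertools.combinations(combo, 2), in generation order
def pvPairs2 : List String → List (String × String)
  | [] => []
  | x :: xs => xs.map (fun y => (x, y)) ++ pvPairs2 xs

-- the 'for combo in shared_combos: if …: return True / return False' loop is a pure
-- existence test, so the (unmodelled) set iteration order cannot affect the result: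
-- it is ported as List.any over the Set
def has_valid_grammar_py (pos_src : List (List String)) (pos_tgt : List (List String)) (valid : List (String × String)) : Bool :=
  let combos_src : List (List String) := if pos_src.isEmpty then [] else pvProduct pos_src
  let combos_tgt : List (List String) := if pos_tgt.isEmpty then [] else pvProduct pos_tgt
  let shared := PySem.Set.inter (PySem.Set.ofList combos_src) (PySem.Set.ofList combos_tgt)
  shared.any (fun combo =>
    let pairs := PySem.Set.ofList (pvPairs2 combo)
    !(PySem.Set.inter valid pairs).isEmpty)

-- ===== PORT B =====
def has_valid_grammar_py_alt (pos_src : List (List String)) (pos_tgt : List (List String)) (valid : List (String × String)) : Bool :=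
  if pos_src.length ≠ pos_tgt.length then false
  else
    let inter := (pos_src.zip pos_tgt).map (fun p => PySem.Set.inter (PySem.Set.ofList p.1) (PySem.Set.ofList p.2))
    if !inter.all (fun s => !s.isEmpty) then false
    else
      valid.any (fun ab =>
        (inter.foldl (fun st s =>
          (st.1 || (st.2 && s.contains ab.2), st.2 || s.contains ab.1)) (false, false)).1)

-- ===== PRECONDITION & SPEC =====
def Spec_has_valid_grammar_py (pos_src : List (List String)) (pos_tgt : List (List String)) (valid : List (String × String)) (out : Bool) : Prop := out = has_valid_grammar_py_alt pos_src pos_tgt valid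
instance (pos_src : List (List String)) (pos_tgt : List (List String)) (valid : List (String × String)) (out : Bool) : Decidable (Spec_has_valid_grammar_py pos_src pos_tgt valid out) := by unfold Spec_has_valid_grammar_py; infer_instance

-- ===== CLAIM (what is proved, stated in full; the proofs are below) =====
def Claim_equal_has_valid_grammar_py : Prop := ∀ (pos_src : List (List String)) (pos_tgt : List (List String)) (valid : List (String × String)), Dom_has_valid_grammar_py pos_src pos_tgt valid → Spec_has_valid_grammar_py pos_src pos_tgt valid (has_valid_grammar_py pos_src pos_tgt valid)

-- ===== LEMMAS AND PROOFS =====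

theorem pair_sublist_cons {α : Type} (a b x : α) (l : List α) :
    List.Sublist [a,b] (x :: l) ↔ (a = x ∧ b ∈ l) ∨ List.Sublist [a,b] l := by
  rw [List.sublist_cons_iff]
  constructor
  · rintro (h | ⟨r, hr, hs⟩)
    · exact Or.inr h
    · cases hr; exact Or.inl ⟨rfl, List.singleton_sublist.1 hs⟩
  · rintro (⟨rfl, hb⟩ | h)
    · exact Or.inr ⟨[b], rfl, List.singleton_sublist.2 hb⟩
    · exact Or.inl h

theorem mem_pvProduct : ∀ (ls : List (List String)) (c : List String),
    c ∈ pvProduct ls ↔ List.Forall₂ (fun x l => x ∈ l) c ls := by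
  intro ls
  induction ls with
  | nil => intro c; simp [pvProduct]
  | cons l ls ih =>
    intro c
    simp [pvProduct, List.forall₂_cons_right_iff, ih]
    tauto

theorem mem_pvPairs2 (a b : String) : ∀ (c : List String),
    (a, b) ∈ pvPairs2 c ↔ List.Sublist [a, b] c := by
  intro c
  induction c with
  | nil => simp [pvPairs2]
  | cons x xs ih =>
    simp [pvPairs2, ih, pair_sublist_cons, Prod.ext_iff]
    tauto

theorem forall₂_sublist {α β : Type} {R : α → β → Prop} {l1 : List α} {l2 : List β}
    (h : List.Forall₂ R l1 l2) : ∀ {s1 : List α}, s1.Sublist l1 →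
    ∃ s2, s2.Sublist l2 ∧ List.Forall₂ R s1 s2 := by
  induction h with
  | nil => intro s1 hs; rw [List.sublist_nil] at hs; exact ⟨[], by simp [hs]⟩
  | cons hab htl ih =>
    intro s1 hs
    rw [List.sublist_cons_iff] at hs
    rcases hs with h' | ⟨r, rfl, hr⟩
    · obtain ⟨s2, hsub, hf⟩ := ih h'
      exact ⟨s2, hsub.cons _, hf⟩
    · obtain ⟨s2, hsub, hf⟩ := ih hr
      exact ⟨_ :: s2, hsub.cons₂ _, List.Forall₂.cons hab hf⟩

theorem forall₂_of_sublist {α β : Type} {R : α → β → Prop} {s2 l2 : List β}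
    (hsub : s2.Sublist l2) : ∀ {s1 : List α}, List.Forall₂ R s1 s2 →
    (∀ x ∈ l2, ∃ y, R y x) →
    ∃ l1, List.Forall₂ R l1 l2 ∧ s1.Sublist l1 := by
  induction hsub with
  | slnil => intro s1 h _; rw [List.forall₂_nil_right_iff] at h; exact ⟨[], by simp [h]⟩
  | cons x htl ih =>
    intro s1 h hfill
    obtain ⟨l1, hf, hs⟩ := ih h (fun y hy => hfill y (List.mem_cons_of_mem _ hy))
    obtain ⟨y, hy⟩ := hfill x (List.mem_cons_self)
    exact ⟨y :: l1, List.Forall₂.cons hy hf, hs.cons _⟩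
  | cons₂ x htl ih =>
    intro s1 h hfill
    rw [List.forall₂_cons_right_iff] at h
    obtain ⟨a, s1', hax, h', rfl⟩ := h
    obtain ⟨l1, hf, hs⟩ := ih h' (fun y hy => hfill y (List.mem_cons_of_mem _ hy))
    exact ⟨a :: l1, List.Forall₂.cons hax hf, hs.cons₂ _⟩

theorem forall₂_mem_right {α β : Type} {R : α → β → Prop} {l1 : List α} {l2 : List β}
    (h : List.Forall₂ R l1 l2) : ∀ b ∈ l2, ∃ a ∈ l1, R a b := by
  induction h with
  | nil => simp
  | cons hab _ ih =>
    intro b hb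
    rcases List.mem_cons.1 hb with rfl | hb
    · exact ⟨_, List.mem_cons_self, hab⟩
    · obtain ⟨a, ha, har⟩ := ih b hb
      exact ⟨a, List.mem_cons_of_mem _ ha, har⟩

theorem scan_iff (a b : String) : ∀ (l : List (List String)) (f g : Bool),
    (l.foldl (fun st s =>
      (st.1 || (st.2 && s.contains b), st.2 || s.contains a)) (f, g)).1 = true ↔
    (f = true ∨ (g = true ∧ ∃ t ∈ l, b ∈ t) ∨
      ∃ s t : List String, List.Sublist [s, t] l ∧ a ∈ s ∧ b ∈ t) := by
  intro l
  induction l with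
  | nil => simp
  | cons s l ih =>
    intro f g
    rw [List.foldl_cons, ih]
    simp only [Bool.or_eq_true, Bool.and_eq_true, List.contains_iff_mem, List.mem_cons]
    constructor
    · rintro ((h | ⟨hg, hb⟩) | (⟨(hg | has), t, ht, hbt⟩ | ⟨s', t, hst, has, hbt⟩))
      · exact Or.inl h
      · exact Or.inr (Or.inl ⟨hg, s, Or.inl rfl, hb⟩)
      · exact Or.inr (Or.inl ⟨hg, t, Or.inr ht, hbt⟩)
      · refine Or.inr (Or.inr ⟨s, t, ?_, has, hbt⟩)
        exact List.cons_sublist_cons.2 (List.singleton_sublist.2 ht)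
      · exact Or.inr (Or.inr ⟨s', t, hst.cons s, has, hbt⟩)
    · rintro (h | ⟨hg, t, (rfl | ht), hbt⟩ | ⟨s', t, hst, has, hbt⟩)
      · exact Or.inl (Or.inl h)
      · exact Or.inl (Or.inr ⟨hg, hbt⟩)
      · exact Or.inr (Or.inl ⟨Or.inl hg, t, ht, hbt⟩)
      · rcases (pair_sublist_cons s' t s l).1 hst with ⟨rfl, ht⟩ | hst'
        · exact Or.inr (Or.inl ⟨Or.inr has, t, ht, hbt⟩)
        · exact Or.inr (Or.inr ⟨s', t, hst', has, hbt⟩)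

theorem forall₂_inter : ∀ (pos_src pos_tgt : List (List String)) (c : List String),
    pos_src.length = pos_tgt.length →
    ((List.Forall₂ (fun x l => x ∈ l) c pos_src ∧ List.Forall₂ (fun x l => x ∈ l) c pos_tgt) ↔
    List.Forall₂ (fun x s => x ∈ s) c
      ((pos_src.zip pos_tgt).map (fun p => PySem.Set.inter (PySem.Set.ofList p.1) (PySem.Set.ofList p.2)))) := by
  intro pos_src
  induction pos_src with
  | nil =>
    intro pt c hlen
    rw [List.length_nil] at hlen
    cases pt with
    | nil => simp [List.forall₂_nil_right_iff]
    | cons t ts => simp at hlen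
  | cons s ss ih =>
    intro pt c hlen
    cases pt with
    | nil => simp at hlen
    | cons t ts =>
      simp only [List.length_cons, Nat.add_left_inj] at hlen
      simp only [List.zip_cons_cons, List.map_cons, List.forall₂_cons_right_iff,
        PySem.Set.mem_inter, PySem.Set.mem_ofList]
      constructor
      · rintro ⟨⟨x, c', hxs, hf1, rfl⟩, ⟨x', c'', hxt, hf2, heq⟩⟩
        cases heq
        exact ⟨x, c', ⟨hxs, hxt⟩, (ih ts c' hlen).1 ⟨hf1, hf2⟩, rfl⟩
      · rintro ⟨x, c', ⟨hxs, hxt⟩, hf, rfl⟩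
        obtain ⟨hf1, hf2⟩ := (ih ts c' hlen).2 hf
        exact ⟨⟨x, c', hxs, hf1, rfl⟩, ⟨x, c', hxt, hf2, rfl⟩⟩

theorem A_iff (ps pt : List (List String)) (v : List (String × String)) :
    has_valid_grammar_py ps pt v = true ↔
    ∃ c a b, List.Forall₂ (fun x l => x ∈ l) c ps ∧ List.Forall₂ (fun x l => x ∈ l) c pt ∧
      (a, b) ∈ v ∧ List.Sublist [a, b] c := by
  unfold has_valid_grammar_py
  simp only [List.any_eq_true, PySem.Set.mem_inter, PySem.Set.mem_ofList,
    Bool.not_eq_true', List.isEmpty_eq_false_iff_exists_mem]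
  by_cases hps : ps = [] <;> by_cases hpt : pt = [] <;>
    simp [hps, hpt, mem_pvProduct, mem_pvPairs2, List.forall₂_nil_right_iff]
  · tauto

theorem B_iff (ps pt : List (List String)) (v : List (String × String)) :
    has_valid_grammar_py_alt ps pt v = true ↔
    (ps.length = pt.length ∧
      (∀ s ∈ (ps.zip pt).map (fun p => PySem.Set.inter (PySem.Set.ofList p.1) (PySem.Set.ofList p.2)), ∃ x, x ∈ s) ∧
      ∃ a b, (a, b) ∈ v ∧ ∃ s t : List String,
        List.Sublist [s, t] ((ps.zip pt).map (fun p => PySem.Set.inter (PySem.Set.ofList p.1) (PySem.Set.ofList p.2))) ∧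
        a ∈ s ∧ b ∈ t) := by
  unfold has_valid_grammar_py_alt
  by_cases hlen : ps.length = pt.length
  · rw [if_neg (by simp [hlen])]
    by_cases hne : ∀ s ∈ (ps.zip pt).map (fun p => PySem.Set.inter (PySem.Set.ofList p.1) (PySem.Set.ofList p.2)), ∃ x, x ∈ s
    · have hall : ((ps.zip pt).map (fun p => PySem.Set.inter (PySem.Set.ofList p.1) (PySem.Set.ofList p.2))).all (fun s => !s.isEmpty) = true := by
        simp only [List.all_eq_true, Bool.not_eq_true', List.isEmpty_eq_false_iff_exists_mem]
        exact hne
      rw [if_neg (by simp [hall])]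
      constructor
      · intro h
        obtain ⟨ab, hab, hsc⟩ := List.any_eq_true.1 h
        rcases (scan_iff ab.1 ab.2 _ false false).1 hsc with h' | ⟨h', _⟩ | ⟨s, t, hst, has, hbt⟩
        · simp at h'
        · simp at h'
        · exact ⟨hlen, hne, ab.1, ab.2, hab, s, t, hst, has, hbt⟩
      · rintro ⟨_, _, a, b, hab, s, t, hst, has, hbt⟩
        exact List.any_eq_true.2 ⟨(a, b), hab,
          (scan_iff a b _ false false).2 (Or.inr (Or.inr ⟨s, t, hst, has, hbt⟩))⟩
    · have hall : ¬ ((ps.zip pt).map (fun p => PySem.Set.inter (PySem.Set.ofList p.1) (PySem.Set.ofList p.2))).all (fun s => !s.isEmpty) = true := by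
        simp only [List.all_eq_true, Bool.not_eq_true', List.isEmpty_eq_false_iff_exists_mem]
        exact hne
      rw [if_pos (by simp only [Bool.not_eq_true] at hall ⊢; simp [hall])]
      constructor
      · intro h; simp at h
      · rintro ⟨_, h, _⟩; exact absurd h hne
  · rw [if_pos (by simp [hlen])]
    simp [hlen]

theorem main_eq (ps pt : List (List String)) (v : List (String × String)) :
    has_valid_grammar_py ps pt v = has_valid_grammar_py_alt ps pt v := by
  have h : has_valid_grammar_py ps pt v = true ↔ has_valid_grammar_py_alt ps pt v = true := by
    rw [A_iff, B_iff]
    constructor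
    · rintro ⟨c, a, b, h1, h2, hv, hsub⟩
      have hlen : ps.length = pt.length := by
        rw [← h1.length_eq, ← h2.length_eq]
      have hF := (forall₂_inter ps pt c hlen).1 ⟨h1, h2⟩
      refine ⟨hlen, ?_, a, b, hv, ?_⟩
      · intro s hs
        obtain ⟨x, _, hxs⟩ := forall₂_mem_right hF s hs
        exact ⟨x, hxs⟩
      · obtain ⟨s2, hs2, hf⟩ := forall₂_sublist hF hsub
        cases hf with
        | cons has hf' =>
          cases hf' with
          | cons hbt hf'' =>
            cases hf''
            exact ⟨_, _, hs2, has, hbt⟩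
    · rintro ⟨hlen, hne, a, b, hv, s, t, hst, has, hbt⟩
      have hfill : ∀ x ∈ (ps.zip pt).map (fun p => PySem.Set.inter (PySem.Set.ofList p.1) (PySem.Set.ofList p.2)), ∃ y, y ∈ x := hne
      have hf : List.Forall₂ (fun (x : String) (l : List String) => x ∈ l) [a, b] [s, t] :=
        List.Forall₂.cons has (List.Forall₂.cons hbt List.Forall₂.nil)
      obtain ⟨c, hF, hsub⟩ := forall₂_of_sublist hst hf hfill
      obtain ⟨h1, h2⟩ := (forall₂_inter ps pt c hlen).2 hF
      exact ⟨c, a, b, h1, h2, hv, hsub⟩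

  cases hA : has_valid_grammar_py ps pt v <;> cases hB : has_valid_grammar_py_alt ps pt v <;> simp_all

-- ===== VERDICT (by name: the statement is the Claim_ definition above) =====
theorem has_valid_grammar_py_spec : Claim_equal_has_valid_grammar_py := by
  intro ps pt v _
  exact main_eq ps pt v
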